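-- pv_equiv track=rewrite | github.com/suseemani/opencode-python | opencode/tool/apply_patch.py | parse_add_file_content
-- ===== SOURCE A (Python) =====
-- def parse_add_file_content(lines: list[str], idx: int) -> tuple[str, int]:
--     """Parse add file content from patch lines."""
--     content_lines = []
--     i = idx
--
--     while i < len(lines) and not lines[i].startswith("***"):
--         if lines[i].startswith("+"):
--             content_lines.append(lines[i][1:])
--         i += 1
--
--     return "\n".join(content_lines), i
-- ===== SOURCE B (Python) =====
-- def parse_add_file_content(lines: list[str], idx: int) -> tuple[str, int]:
--     """Parse add file content from patch lines."""
--     section = lines[idx:]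
--     for stop, line in enumerate(section):
--         if line.startswith("***"):
--             section = section[:stop]
--             break
--     content = "\n".join(line[1:] for line in section if line.startswith("+"))
--     return content, idx + len(section)
-- ===== Notes on version B (the rewrite author's own statement) =====
-- stated objective: alternative
-- what changed: Replaces A's fused index-walking while loop (appending content while advancing an int cursor) with a staged pipeline over the suffix lines[idx:]: truncate the section at the first '***' marker, then build the content by a declarative filter/map join, with the stop index recovered as idx + len(section). Pre_ excludes negative idx, where A's negative-index wraparound re-reads lines from the end.
-- outside the precondition, e.g. on parse_add_file_content(['+a'], -1): A returns ('a\na', 1), B returns ('a', 0)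
import Mathlib
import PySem

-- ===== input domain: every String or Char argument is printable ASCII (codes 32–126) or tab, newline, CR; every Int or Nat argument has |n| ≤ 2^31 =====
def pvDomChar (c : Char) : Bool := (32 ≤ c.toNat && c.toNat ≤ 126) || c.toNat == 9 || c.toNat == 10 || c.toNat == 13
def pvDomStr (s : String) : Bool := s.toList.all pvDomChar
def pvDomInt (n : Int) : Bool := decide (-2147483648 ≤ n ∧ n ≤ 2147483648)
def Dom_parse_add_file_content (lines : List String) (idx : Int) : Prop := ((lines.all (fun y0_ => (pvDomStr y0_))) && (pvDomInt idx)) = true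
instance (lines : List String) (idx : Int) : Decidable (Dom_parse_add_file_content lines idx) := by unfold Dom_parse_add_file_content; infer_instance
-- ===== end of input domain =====

-- B replaces A's fused index-walking while loop with a staged pipeline over the suffix lines[idx:]:
-- truncate at the first "***" line, then filter/map-join; return value only, no mutation.

-- ===== PORT A =====
-- A's while loop: i walks up while i < len(lines) and lines[i] does not start with "***";
-- '+'-lines contribute line[1:] to the accumulator (A raises IndexError / wraps for negative
-- idx, which Pre_ excludes; the .getD "" default is never reached under Pre_)
def pvA_loop (lines : List String) (i : Int) (acc : List String) : String × Int :=
  if h : i < (lines.length : Int) then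
    let line := (PySem.List.pyGet? lines i).getD ""
    if PySem.Str.startswith line "***" then (PySem.Str.join "\n" acc, i)
    else pvA_loop lines (i + 1)
      (if PySem.Str.startswith line "+" then acc ++ [PySem.Str.slice line (some 1) none] else acc)
  else (PySem.Str.join "\n" acc, i)
termination_by ((lines.length : Int) - i).toNat
decreasing_by omega

def parse_add_file_content (lines : List String) (idx : Int) : String × Int :=
  pvA_loop lines idx []

-- ===== PORT B =====
-- B's first stage: the for/enumerate loop that truncates the section at the first "***" line
def pvB_section (sec : List String) : List String :=
  match sec with
  | [] => []
  | l :: tl => if PySem.Str.startswith l "***" then [] else l :: pvB_section tl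

def parse_add_file_content_alt (lines : List String) (idx : Int) : String × Int :=
  let sec := pvB_section (PySem.List.slice lines (some idx) none)
  (PySem.Str.join "\n"
      ((sec.filter (fun l => PySem.Str.startswith l "+")).map
        (fun l => PySem.Str.slice l (some 1) none)),
    idx + (sec.length : Int))

-- ===== PRECONDITION & SPEC =====
-- Pre_ restricts idx to the natural domain of a scan start index: for negative idx, A's
-- negative-index wraparound re-reads lines from the end (an accident of Python indexing,
-- duplicating content) or raises IndexError when idx < -len(lines).
def Pre_parse_add_file_content (lines : List String) (idx : Int) : Prop := 0 ≤ idx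
instance (lines : List String) (idx : Int) : Decidable (Pre_parse_add_file_content lines idx) := by
  unfold Pre_parse_add_file_content; infer_instance

def pvWitness_parse_add_file_content : List String × Int := (["+a", "ctx", "*** End"], 0)

def Spec_parse_add_file_content (lines : List String) (idx : Int) (out : String × Int) : Prop :=
  out = parse_add_file_content_alt lines idx
instance (lines : List String) (idx : Int) (out : String × Int) :
    Decidable (Spec_parse_add_file_content lines idx out) := by
  unfold Spec_parse_add_file_content; infer_instance

-- ===== CLAIM (what is proved, stated in full; the proofs are below) =====
def Claim_equal_parse_add_file_content : Prop := ∀ (lines : List String) (idx : Int), Dom_parse_add_file_content lines idx → Pre_parse_add_file_content lines idx → Spec_parse_add_file_content lines idx (parse_add_file_content lines idx)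

-- ===== LEMMAS AND PROOFS =====

-- A's loop from index i computes B's staged pipeline on the suffix lines.drop i.toNat
theorem pvA_loop_eq (lines : List String) (i : Int) (acc : List String) (h0 : 0 ≤ i) :
    pvA_loop lines i acc =
      (PySem.Str.join "\n" (acc ++
        (((pvB_section (lines.drop i.toNat)).filter
            (fun l => PySem.Str.startswith l "+")).map
          (fun l => PySem.Str.slice l (some 1) none))),
        i + ((pvB_section (lines.drop i.toNat)).length : Int)) := by
  by_cases h : i < (lines.length : Int)
  · have hi : i.toNat < lines.length := by omega
    have hdrop : lines.drop i.toNat = lines[i.toNat] :: lines.drop (i.toNat + 1) :=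
      List.drop_eq_getElem_cons hi
    have hget : PySem.List.pyGet? lines i = some (lines[i.toNat]'hi) :=
      PySem.List.pyGet?_eq_some_getElem lines h0 h
    rw [pvA_loop]
    simp only [h, dif_pos, hget, Option.getD_some]
    by_cases hm : PySem.Str.startswith (lines[i.toNat]'hi) "***" = true
    · rw [if_pos hm, hdrop, pvB_section, if_pos hm]
      simp
    · rw [if_neg hm]
      have hrec := pvA_loop_eq lines (i + 1)
        (if PySem.Str.startswith (lines[i.toNat]'hi) "+" then
          acc ++ [PySem.Str.slice (lines[i.toNat]'hi) (some 1) none] else acc) (by omega)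
      have h1 : (i + 1).toNat = i.toNat + 1 := by omega
      rw [h1] at hrec
      rw [hrec, hdrop, pvB_section, if_neg hm]
      by_cases hp : PySem.Str.startswith (lines[i.toNat]'hi) "+" = true
      · have hpc : PySem.Chars.startswith (lines[i.toNat]'hi).toList ['+'] = true := by
          simpa [PySem.Str.startswith] using hp
        simp [hpc, List.append_assoc]
        omega
      · have hpc : PySem.Chars.startswith (lines[i.toNat]'hi).toList ['+'] = false := by
          simpa [PySem.Str.startswith] using hp
        simp [hpc]
        omega
  · rw [pvA_loop]
    simp only [h, dif_neg, not_false_iff]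
    have : lines.drop i.toNat = [] := List.drop_eq_nil_of_le (by omega)
    rw [this, pvB_section]
    simp
termination_by ((lines.length : Int) - i).toNat
decreasing_by omega

-- ===== VERDICT (by name: the statement is the Claim_ definition above) =====
theorem parse_add_file_content_spec : Claim_equal_parse_add_file_content := by
  intro lines idx _hdom hpre
  unfold Spec_parse_add_file_content parse_add_file_content parse_add_file_content_alt
  rw [pvA_loop_eq lines idx [] hpre, PySem.List.slice_from lines hpre]
  rfl
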